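-- pv_equiv track=rewrite | github.com/Real1236/LeetcodePython | leetcode/editor/en/WTA/WTA 2024/achan625_session5_q2.py | reachTibetAndNepal
-- ===== SOURCE A (Python) =====
-- from collections import deque
-- from typing import List
--
-- def reachTibetAndNepal(everest: List[List[int]]) -> int:
--     def bfs(queue: deque) -> set:
--         directions = [[1, 0], [-1, 0], [0, 1], [0, -1]]
--         visited = set()
--         while queue:
--             row, col = queue.popleft()
--             visited.add((row, col))
--             for dx, dy in directions:
--                 new_row, new_col = row + dx, col + dy
--                 if (new_row < 0 or new_col < 0
--                     or new_row >= len(everest) or new_col >= len(everest[0])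
--                     or (new_row, new_col) in visited):
--                     continue
--                 if everest[new_row][new_col] >= everest[row][col]:
--                     queue.append((new_row, new_col))
--         return visited
--
--
--     queue = deque([])
--     for row in range(len(everest)):
--         queue.append((row, 0))
--     for col in range(len(everest[0])):
--         queue.append((0, col))
--
--     tibet = bfs(queue)
--
--     queue = deque([])
--     for row in range(len(everest)):
--         queue.append((row, len(everest[0]) - 1))
--     for col in range(len(everest[0])):
--         queue.append((len(everest) - 1, col))
--
--     nepal = bfs(queue)
--
--     return len(tibet.intersection(nepal))
-- ===== SOURCE B (Python) =====
-- from typing import List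
--
-- def reachTibetAndNepal(everest: List[List[int]]) -> int:
--     rows, cols = len(everest), len(everest[0])
--
--     def saturate(reach: set) -> set:
--         # round-based saturation: sweep the whole grid until a full pass adds nothing
--         changed = True
--         while changed:
--             changed = False
--             for r in range(rows):
--                 for c in range(cols):
--                     if (r, c) not in reach:
--                         for nr, nc in ((r + 1, c), (r - 1, c), (r, c + 1), (r, c - 1)):
--                             if (nr, nc) in reach and everest[r][c] >= everest[nr][nc]:
--                                 reach.add((r, c))
--                                 changed = True
--                                 break
--         return reach
--
--     tibet = saturate({(r, 0) for r in range(rows)} | {(0, c) for c in range(cols)})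
--     nepal = saturate({(r, cols - 1) for r in range(rows)} | {(rows - 1, c) for c in range(cols)})
--     return len(tibet & nepal)
-- ===== Notes on version B (the rewrite author's own statement) =====
-- stated objective: alternative
-- what changed: Replaces the two worklist BFS flood-fills (deque + visited set, popping cells and enqueueing admissible neighbours, with duplicate enqueues) by a round-based saturation: repeatedly sweep the whole grid row-major and mark any unmarked cell that has an already-marked neighbour of not-greater height, until a full sweep changes nothing; the count of cells marked by both sweeps is returned.
import Mathlib
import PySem

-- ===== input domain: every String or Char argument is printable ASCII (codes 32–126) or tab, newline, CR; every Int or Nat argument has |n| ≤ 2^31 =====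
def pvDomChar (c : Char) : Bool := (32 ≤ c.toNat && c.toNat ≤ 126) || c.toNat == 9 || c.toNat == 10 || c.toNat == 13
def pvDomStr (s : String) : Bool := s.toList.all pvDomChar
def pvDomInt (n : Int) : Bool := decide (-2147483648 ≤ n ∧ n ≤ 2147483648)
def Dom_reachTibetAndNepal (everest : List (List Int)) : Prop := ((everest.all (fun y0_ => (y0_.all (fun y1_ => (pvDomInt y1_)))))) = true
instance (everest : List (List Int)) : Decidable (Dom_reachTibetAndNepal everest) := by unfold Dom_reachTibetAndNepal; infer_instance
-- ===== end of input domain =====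

-- B replaces A's two worklist BFS floods by round-based whole-grid saturation
-- sweeps (an alternative algorithm with the same return value).

-- ===== PORT A =====
-- Shared indexing helper: everest[r][c]. On inputs admitted by Pre_ below, both
-- Pythons only evaluate everest[r][c] where indexing succeeds, so the `.getD`
-- defaults are never the value of an expression Python would raise on.
def pvRow (e : List (List Int)) (r : Int) : List Int := (PySem.List.pyGet? e r).getD []
def pvAt (e : List (List Int)) (r c : Int) : Int := (PySem.List.pyGet? (pvRow e r) c).getD 0
def pvN (e : List (List Int)) : Int := (e.length : Int)
def pvM (e : List (List Int)) : Int := ((pvRow e 0).length : Int)  -- len(everest[0])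
def pvDirs : List (Int × Int) := [(1,0),(-1,0),(0,1),(0,-1)]

-- the in-bounds, unvisited, height-admissible neighbours A appends to the queue
def pvEligible (e : List (List Int)) (visited : PySem.Set (Int × Int)) (u : Int × Int) :
    List (Int × Int) :=
  pvDirs.filterMap (fun d =>
    if u.1 + d.1 < 0 ∨ u.2 + d.2 < 0 ∨ pvN e ≤ u.1 + d.1 ∨ pvM e ≤ u.2 + d.2 ∨
        (u.1 + d.1, u.2 + d.2) ∈ visited then none
    else if pvAt e u.1 u.2 ≤ pvAt e (u.1 + d.1) (u.2 + d.2) then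
      some (u.1 + d.1, u.2 + d.2)
    else none)

-- the grid cell list (row-major); used by B's sweep and by both termination measures
def pvUniv (e : List (List Int)) : List (Int × Int) :=
  (PySem.List.pyRange 0 (pvN e)).flatMap (fun r =>
    (PySem.List.pyRange 0 (pvM e)).map (fun c => (r, c)))

lemma pvUniv_mem (e : List (List Int)) (x : Int × Int) :
    x ∈ pvUniv e ↔ 0 ≤ x.1 ∧ x.1 < pvN e ∧ 0 ≤ x.2 ∧ x.2 < pvM e := by
  obtain ⟨a, b⟩ := x
  simp only [pvUniv, List.mem_flatMap, List.mem_map, PySem.List.mem_pyRange_one,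
    Prod.mk.injEq]
  constructor
  · rintro ⟨r, hr, c, hc, rfl, rfl⟩; exact ⟨hr.1, hr.2, hc.1, hc.2⟩
  · rintro ⟨h1, h2, h3, h4⟩; exact ⟨a, ⟨h1, h2⟩, b, ⟨h3, h4⟩, rfl, rfl⟩

lemma pvEligible_mem (e : List (List Int)) (V : PySem.Set (Int × Int)) (u x : Int × Int) :
    x ∈ pvEligible e V u ↔
      (∃ d ∈ pvDirs, x = (u.1 + d.1, u.2 + d.2)) ∧
      (0 ≤ x.1 ∧ x.1 < pvN e ∧ 0 ≤ x.2 ∧ x.2 < pvM e) ∧ x ∉ V ∧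
      pvAt e u.1 u.2 ≤ pvAt e x.1 x.2 := by
  simp only [pvEligible, List.mem_filterMap]
  constructor
  · rintro ⟨d, hd, h⟩
    split_ifs at h with h1 h2
    all_goals
      injection h with h'
      subst h'
      push_neg at h1
      exact ⟨⟨d, hd, rfl⟩, ⟨by omega, by omega, by omega, by omega⟩, h1.2.2.2.2, h2⟩
  · rintro ⟨⟨d, hd, hx⟩, hb, hv, hh⟩
    subst hx
    refine ⟨d, hd, ?_⟩
    rw [if_neg (by push_neg; exact ⟨by omega, by omega, by omega, by omega, hv⟩), if_pos hh]

lemma pvBfs_dec1 (e : List (List Int)) (visited : PySem.Set (Int × Int))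
    (u : Int × Int) (rest : List (Int × Int)) (hu : u ∉ visited) :
    (((pvUniv e ++ (rest ++ pvEligible e (PySem.Set.add visited u) u)).toFinset.filter
        (fun c => c ∉ PySem.Set.add visited u)).card
    < ((pvUniv e ++ (u :: rest)).toFinset.filter (fun c => c ∉ visited)).card) := by
  apply Finset.card_lt_card
  rw [Finset.ssubset_iff_of_subset]
  · refine ⟨u, ?_, ?_⟩
    · simp [Finset.mem_filter, List.mem_toFinset, hu]
    · simp [Finset.mem_filter, PySem.Set.mem_add]
  · intro x hx
    simp only [Finset.mem_filter, List.mem_toFinset, List.mem_append,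
      PySem.Set.mem_add] at hx ⊢
    push_neg at hx
    obtain ⟨hbase, hnv, hne⟩ := hx
    refine ⟨?_, hnv⟩
    rcases hbase with h | h | h
    · exact Or.inl h
    · exact Or.inr (by simp [h])
    · exact Or.inl ((pvUniv_mem e x).mpr ((pvEligible_mem e _ u x).mp h).2.1)

lemma pvBfs_dec2a (e : List (List Int)) (visited : PySem.Set (Int × Int))
    (u : Int × Int) (rest : List (Int × Int)) (hu : u ∈ visited) :
    (((pvUniv e ++ (rest ++ pvEligible e (PySem.Set.add visited u) u)).toFinset.filter
        (fun c => c ∉ PySem.Set.add visited u)).card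
    ≤ ((pvUniv e ++ (u :: rest)).toFinset.filter (fun c => c ∉ visited)).card) := by
  rw [PySem.Set.add_of_mem hu]
  apply Finset.card_le_card
  intro x hx
  simp only [Finset.mem_filter, List.mem_toFinset, List.mem_append] at hx ⊢
  obtain ⟨hbase, hnv⟩ := hx
  refine ⟨?_, hnv⟩
  rcases hbase with h | h | h
  · exact Or.inl h
  · exact Or.inr (by simp [h])
  · exact Or.inl ((pvUniv_mem e x).mpr ((pvEligible_mem e _ u x).mp h).2.1)

lemma pvBfs_dec2b (e : List (List Int)) (visited : PySem.Set (Int × Int))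
    (u : Int × Int) (rest : List (Int × Int)) (hu : u ∈ visited) :
    (((rest ++ pvEligible e (PySem.Set.add visited u) u).filter
        (fun c => decide (c ∈ PySem.Set.add visited u))).length
    < (((u :: rest)).filter (fun c => decide (c ∈ visited))).length) := by
  rw [PySem.Set.add_of_mem hu, List.filter_append]
  have hE : (pvEligible e visited u).filter (fun c => decide (c ∈ visited)) = [] := by
    rw [List.filter_eq_nil_iff]
    intro a ha
    have := ((pvEligible_mem e visited u a).mp ha).2.2.1
    simpa using this
  rw [hE, List.filter_cons, if_pos (by simpa using hu)]
  simp

def pvBfs (e : List (List Int)) (visited : PySem.Set (Int × Int))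
    (queue : List (Int × Int)) : PySem.Set (Int × Int) :=
  match queue with
  | [] => visited
  | u :: rest =>
      let visited' := PySem.Set.add visited u
      pvBfs e visited' (rest ++ pvEligible e visited' u)
termination_by
  (((pvUniv e ++ queue).toFinset.filter (fun c => c ∉ visited)).card,
   (queue.filter (fun c => decide (c ∈ visited))).length)
decreasing_by
  by_cases hu : u ∈ visited
  · rcases lt_or_eq_of_le (pvBfs_dec2a e visited u rest hu) with h | h
    · exact Prod.Lex.left _ _ h
    · rw [h]; exact Prod.Lex.right _ (pvBfs_dec2b e visited u rest hu)
  · exact Prod.Lex.left _ _ (pvBfs_dec1 e visited u rest hu)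

-- port of A: two BFS floods seeded from the two borders, then len(tibet ∩ nepal)
def reachTibetAndNepal (everest : List (List Int)) : Int :=
  let q1 := (PySem.List.pyRange 0 (pvN everest)).map (fun r => (r, (0 : Int)))
         ++ (PySem.List.pyRange 0 (pvM everest)).map (fun c => ((0 : Int), c))
  let tibet := pvBfs everest PySem.Set.empty q1
  let q2 := (PySem.List.pyRange 0 (pvN everest)).map (fun r => (r, pvM everest - 1))
         ++ (PySem.List.pyRange 0 (pvM everest)).map (fun c => (pvN everest - 1, c))
  let nepal := pvBfs everest PySem.Set.empty q2
  PySem.Set.len (PySem.Set.inter tibet nepal)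

-- ===== PORT B =====
def pvNbrs (v : Int × Int) : List (Int × Int) :=
  [(v.1 + 1, v.2), (v.1 - 1, v.2), (v.1, v.2 + 1), (v.1, v.2 - 1)]

-- one cell of a sweep: mark it if unmarked and some marked neighbour is not higher
def pvScanCell (e : List (List Int)) (st : PySem.Set (Int × Int) × Bool)
    (v : Int × Int) : PySem.Set (Int × Int) × Bool :=
  if v ∈ st.1 then st
  else if (pvNbrs v).any
      (fun u => decide (u ∈ st.1) && decide (pvAt e u.1 u.2 ≤ pvAt e v.1 v.2)) then
    (PySem.Set.add st.1 v, true)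
  else st

-- one full row-major sweep; the Bool records whether anything was added
def pvPass (e : List (List Int)) (reach : PySem.Set (Int × Int)) :
    PySem.Set (Int × Int) × Bool :=
  (pvUniv e).foldl (pvScanCell e) (reach, false)

lemma pvScanCell_mono (e : List (List Int)) (st : PySem.Set (Int × Int) × Bool)
    (v x : Int × Int) (hx : x ∈ st.1) : x ∈ (pvScanCell e st v).1 := by
  unfold pvScanCell
  split_ifs <;> simp [PySem.Set.mem_add, hx]

lemma pvFold_mono (e : List (List Int)) (cells : List (Int × Int))
    (st : PySem.Set (Int × Int) × Bool) (x : Int × Int) (hx : x ∈ st.1) :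
    x ∈ (cells.foldl (pvScanCell e) st).1 := by
  induction cells generalizing st with
  | nil => exact hx
  | cons c cs ih => exact ih _ (pvScanCell_mono e st c x hx)

lemma pvFold_new (e : List (List Int)) (cells : List (Int × Int))
    (st : PySem.Set (Int × Int) × Bool)
    (h : (cells.foldl (pvScanCell e) st).2 = true) :
    st.2 = true ∨ ∃ c ∈ cells, c ∉ st.1 ∧ c ∈ (cells.foldl (pvScanCell e) st).1 := by
  induction cells generalizing st with
  | nil => exact Or.inl h
  | cons c cs ih =>
    simp only [List.foldl_cons] at h ⊢
    rcases ih (pvScanCell e st c) h with h2 | ⟨c', hc', hn, hm⟩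
    · by_cases hv : c ∈ st.1
      · left; unfold pvScanCell at h2; rw [if_pos hv] at h2; exact h2
      · unfold pvScanCell at h2; rw [if_neg hv] at h2
        split_ifs at h2 with hany
        · right; refine ⟨c, by simp, hv, ?_⟩
          apply pvFold_mono
          simp [pvScanCell, hv, hany]
        · exact Or.inl h2
    · right
      exact ⟨c', by simp [hc'], fun hmem => hn (pvScanCell_mono e st c c' hmem), hm⟩

lemma pvSaturate_dec (e : List (List Int)) (reach : PySem.Set (Int × Int))
    (h : (pvPass e reach).2 = true) :
    (((pvUniv e).toFinset.filter (fun c => c ∉ (pvPass e reach).1)).card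
    < ((pvUniv e).toFinset.filter (fun c => c ∉ reach)).card) := by
  unfold pvPass at h ⊢
  obtain h2 | ⟨c, hc, hn, hm⟩ := pvFold_new e (pvUniv e) (reach, false) h
  · exact absurd h2 (by simp)
  · apply Finset.card_lt_card
    rw [Finset.ssubset_iff_of_subset]
    · refine ⟨c, ?_, ?_⟩
      · simp only [Finset.mem_filter, List.mem_toFinset]
        exact ⟨hc, by simp at hn; exact hn⟩
      · simp only [Finset.mem_filter, List.mem_toFinset, not_and, not_not]
        exact fun _ => hm
    · intro x hx
      simp only [Finset.mem_filter, List.mem_toFinset] at hx ⊢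
      exact ⟨hx.1, fun hmem => hx.2 (pvFold_mono e (pvUniv e) (reach, false) x hmem)⟩

def pvSaturate (e : List (List Int)) (reach : PySem.Set (Int × Int)) :
    PySem.Set (Int × Int) :=
  let res := pvPass e reach
  if h : res.2 = true then pvSaturate e res.1 else reach
termination_by ((pvUniv e).toFinset.filter (fun c => c ∉ reach)).card
decreasing_by
  exact pvSaturate_dec e reach h

-- port of B: saturate from each border seed set, then len(tibet ∩ nepal)
def reachTibetAndNepal_alt (everest : List (List Int)) : Int :=
  let tibet := pvSaturate everest
    (PySem.Set.union
      (PySem.Set.ofList ((PySem.List.pyRange 0 (pvN everest)).map (fun r => (r, (0 : Int)))))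
      ((PySem.List.pyRange 0 (pvM everest)).map (fun c => ((0 : Int), c))))
  let nepal := pvSaturate everest
    (PySem.Set.union
      (PySem.Set.ofList ((PySem.List.pyRange 0 (pvN everest)).map (fun r => (r, pvM everest - 1))))
      ((PySem.List.pyRange 0 (pvM everest)).map (fun c => (pvN everest - 1, c))))
  PySem.Set.len (PySem.Set.inter tibet nepal)

-- ===== PRECONDITION & SPEC =====
-- Pre_ excludes exactly the inputs where Python A raises IndexError: the empty
-- outer list (everest[0]) and grids with a row shorter than row 0 (the border
-- floods evaluate everest[r][c] at some missing cell of such a row).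
def Pre_reachTibetAndNepal (everest : List (List Int)) : Prop :=
  everest ≠ [] ∧ ∀ row ∈ everest, pvM everest ≤ (row.length : Int)
instance (everest : List (List Int)) : Decidable (Pre_reachTibetAndNepal everest) := by
  unfold Pre_reachTibetAndNepal; infer_instance

def pvWitness_reachTibetAndNepal : List (List Int) := [[1, 2], [4, 3]]

def Spec_reachTibetAndNepal (everest : List (List Int)) (out : Int) : Prop :=
  out = reachTibetAndNepal_alt everest
instance (everest : List (List Int)) (out : Int) :
    Decidable (Spec_reachTibetAndNepal everest out) := by
  unfold Spec_reachTibetAndNepal; infer_instance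

-- ===== CLAIM (what is proved, stated in full; the proofs are below) =====
def Claim_equal_reachTibetAndNepal : Prop :=
  ∀ (everest : List (List Int)), Dom_reachTibetAndNepal everest →
    Pre_reachTibetAndNepal everest →
    Spec_reachTibetAndNepal everest (reachTibetAndNepal everest)

-- ===== LEMMAS AND PROOFS =====

-- the flow relation both programs flood along: v is an in-grid neighbour of u
-- whose height is at least u's
def pvInGrid (e : List (List Int)) (v : Int × Int) : Prop :=
  0 ≤ v.1 ∧ v.1 < pvN e ∧ 0 ≤ v.2 ∧ v.2 < pvM e

def pvEdge (e : List (List Int)) (u v : Int × Int) : Prop :=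
  v ∈ pvNbrs u ∧ pvInGrid e v ∧ pvAt e u.1 u.2 ≤ pvAt e v.1 v.2

inductive pvReach (e : List (List Int)) (seeds : List (Int × Int)) : (Int × Int) → Prop
  | seed (c : Int × Int) : c ∈ seeds → pvReach e seeds c
  | step (u v : Int × Int) : pvReach e seeds u → pvEdge e u v → pvReach e seeds v

lemma pvNbrs_symm (u v : Int × Int) : u ∈ pvNbrs v ↔ v ∈ pvNbrs u := by
  obtain ⟨a, b⟩ := u
  obtain ⟨c, d⟩ := v
  simp only [pvNbrs, List.mem_cons, Prod.mk.injEq, List.not_mem_nil, or_false]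
  omega

lemma pvEligible_iff_edge (e : List (List Int)) (V : PySem.Set (Int × Int))
    (u x : Int × Int) : x ∈ pvEligible e V u ↔ pvEdge e u x ∧ x ∉ V := by
  rw [pvEligible_mem]
  unfold pvEdge pvInGrid
  constructor
  · rintro ⟨⟨d, hd, hx⟩, hb, hv, hh⟩
    refine ⟨⟨?_, hb, hh⟩, hv⟩
    subst hx
    simp only [pvDirs, List.mem_cons, List.not_mem_nil, or_false] at hd
    rcases hd with rfl | rfl | rfl | rfl <;>
      simp [pvNbrs, Prod.ext_iff] <;> omega
  · rintro ⟨⟨hn, hb, hh⟩, hv⟩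
    refine ⟨?_, hb, hv, hh⟩
    obtain ⟨a, b⟩ := u
    obtain ⟨c, d⟩ := x
    simp only [pvNbrs, List.mem_cons, Prod.mk.injEq, List.not_mem_nil, or_false] at hn
    rcases hn with ⟨rfl, rfl⟩ | ⟨rfl, rfl⟩ | ⟨rfl, rfl⟩ | ⟨rfl, rfl⟩
    · exact ⟨(1, 0), by decide, by rw [Prod.mk.injEq]; exact ⟨by omega, by omega⟩⟩
    · exact ⟨(-1, 0), by decide, by rw [Prod.mk.injEq]; exact ⟨by omega, by omega⟩⟩
    · exact ⟨(0, 1), by decide, by rw [Prod.mk.injEq]; exact ⟨by omega, by omega⟩⟩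
    · exact ⟨(0, -1), by decide, by rw [Prod.mk.injEq]; exact ⟨by omega, by omega⟩⟩

-- ---- A side: the BFS visited set is exactly the reachable set ----

lemma pvBfs_superset (e : List (List Int)) (V : PySem.Set (Int × Int))
    (Q : List (Int × Int)) :
    ∀ x, x ∈ V ∨ x ∈ Q → x ∈ pvBfs e V Q := by
  fun_induction pvBfs e V Q with
  | case1 V => simpa using fun x h => h
  | case2 V u rest visited' ih =>
    intro x hx
    refine ih x ?_
    rcases hx with hx | hx
    · exact Or.inl (by simp [visited', PySem.Set.mem_add, hx])
    · rcases List.mem_cons.mp hx with rfl | hx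
      · exact Or.inl (by simp [visited', PySem.Set.mem_add])
      · exact Or.inr (by simp [hx])

lemma pvBfs_sound (e : List (List Int)) (R : (Int × Int) → Prop)
    (hR : ∀ u v, R u → pvEdge e u v → R v) (V : PySem.Set (Int × Int))
    (Q : List (Int × Int)) :
    (∀ x ∈ V, R x) → (∀ x ∈ Q, R x) → ∀ x ∈ pvBfs e V Q, R x := by
  fun_induction pvBfs e V Q with
  | case1 V => exact fun hV _ x hx => hV x hx
  | case2 V u rest visited' ih =>
    intro hV hQ
    have hu : R u := hQ u (by simp)
    refine ih ?_ ?_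
    · intro x hx
      rw [PySem.Set.mem_add] at hx
      rcases hx with hx | rfl
      · exact hV x hx
      · exact hu
    · intro x hx
      rcases List.mem_append.mp hx with hx | hx
      · exact hQ x (by simp [hx])
      · exact hR u x hu ((pvEligible_iff_edge e visited' u x).mp hx).1

lemma pvBfs_closed (e : List (List Int)) (V : PySem.Set (Int × Int))
    (Q : List (Int × Int)) :
    (∀ u v, u ∈ V → pvEdge e u v → v ∈ V ∨ v ∈ Q) →
    ∀ u v, u ∈ pvBfs e V Q → pvEdge e u v → v ∈ pvBfs e V Q := by
  fun_induction pvBfs e V Q with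
  | case1 V =>
    intro h u v hu he
    rcases h u v hu he with hv | hv
    · exact hv
    · exact absurd hv (by simp)
  | case2 V u0 rest visited' ih =>
    intro h
    refine ih ?_
    intro a b ha he
    rw [PySem.Set.mem_add] at ha
    by_cases hbv : b ∈ visited'
    · exact Or.inl hbv
    · rcases ha with ha | rfl
      · rcases h a b ha he with hv | hv
        · exact Or.inl (by simp [visited', PySem.Set.mem_add, hv])
        · rcases List.mem_cons.mp hv with rfl | hv
          · exact Or.inl (by simp [visited', PySem.Set.mem_add])
          · exact Or.inr (by simp [hv])
      · exact Or.inr (by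
          simp only [List.mem_append]
          exact Or.inr ((pvEligible_iff_edge e visited' a b).mpr ⟨he, hbv⟩))

lemma pvBfs_iff (e : List (List Int)) (Q : List (Int × Int)) (x : Int × Int) :
    x ∈ pvBfs e PySem.Set.empty Q ↔ pvReach e Q x := by
  constructor
  · exact fun h => pvBfs_sound e (pvReach e Q) (fun u v hu he => pvReach.step u v hu he)
      PySem.Set.empty Q (by intro y hy; simp [PySem.Set.empty] at hy)
      (fun y hy => pvReach.seed y hy) x h
  · intro h
    induction h with
    | seed c hc => exact pvBfs_superset e _ Q c (Or.inr hc)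
    | step u v _ he ih =>
        exact pvBfs_closed e PySem.Set.empty Q
          (by intro a b ha; simp [PySem.Set.empty] at ha) u v ih he

lemma pvBfs_nodup (e : List (List Int)) (V : PySem.Set (Int × Int))
    (Q : List (Int × Int)) : V.Nodup → (pvBfs e V Q).Nodup := by
  fun_induction pvBfs e V Q with
  | case1 V => exact id
  | case2 V u rest visited' ih => exact fun h => ih (PySem.Set.nodup_add V u h)

-- ---- B side: the saturated set is exactly the reachable set ----

lemma pvFold_sound (e : List (List Int)) (R : (Int × Int) → Prop)
    (hR : ∀ u v, R u → pvEdge e u v → R v) (cells : List (Int × Int))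
    (hc : ∀ c ∈ cells, pvInGrid e c) (st : PySem.Set (Int × Int) × Bool)
    (hst : ∀ x ∈ st.1, R x) : ∀ x ∈ (cells.foldl (pvScanCell e) st).1, R x := by
  induction cells generalizing st with
  | nil => exact hst
  | cons c cs ih =>
    refine ih (fun d hd => hc d (by simp [hd])) (pvScanCell e st c) ?_
    intro x hx
    unfold pvScanCell at hx
    split_ifs at hx with h1 h2
    · exact hst x hx
    · rw [PySem.Set.mem_add] at hx
      rcases hx with hx | rfl
      · exact hst x hx
      · simp only [List.any_eq_true, Bool.and_eq_true, decide_eq_true_eq] at h2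
        obtain ⟨u, hu, hmem, hh⟩ := h2
        exact hR u x (hst u hmem) ⟨(pvNbrs_symm x u).mpr hu, hc x (by simp), hh⟩
    · exact hst x hx

lemma pvFold_flag_mono (e : List (List Int)) (cells : List (Int × Int))
    (st : PySem.Set (Int × Int) × Bool) (h : st.2 = true) :
    (cells.foldl (pvScanCell e) st).2 = true := by
  induction cells generalizing st with
  | nil => exact h
  | cons c cs ih =>
    refine ih (pvScanCell e st c) ?_
    unfold pvScanCell; split_ifs <;> simp [h]

lemma pvFold_stable (e : List (List Int)) (cells : List (Int × Int))
    (st : PySem.Set (Int × Int) × Bool)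
    (h : (cells.foldl (pvScanCell e) st).2 = false) :
    (cells.foldl (pvScanCell e) st).1 = st.1 ∧
    ∀ c ∈ cells, c ∈ st.1 ∨ ∀ u ∈ pvNbrs c,
      ¬(u ∈ st.1 ∧ pvAt e u.1 u.2 ≤ pvAt e c.1 c.2) := by
  induction cells generalizing st with
  | nil => exact ⟨rfl, by simp⟩
  | cons c cs ih =>
    simp only [List.foldl_cons] at h ⊢
    have hstep : pvScanCell e st c = st ∧
        (c ∈ st.1 ∨ ∀ u ∈ pvNbrs c, ¬(u ∈ st.1 ∧ pvAt e u.1 u.2 ≤ pvAt e c.1 c.2)) := by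
      unfold pvScanCell
      split_ifs with h1 h2
      · exact ⟨rfl, Or.inl h1⟩
      · exfalso
        have harg : pvScanCell e st c = (PySem.Set.add st.1 c, true) := by
          unfold pvScanCell
          rw [if_neg h1, if_pos h2]
        rw [harg] at h
        have hmono := pvFold_flag_mono e cs (PySem.Set.add st.1 c, true) rfl
        rw [hmono] at h
        exact Bool.noConfusion h
      · refine ⟨rfl, Or.inr ?_⟩
        rintro u hu ⟨hmem, hh⟩
        exact h2 (by
          simp only [List.any_eq_true, Bool.and_eq_true, decide_eq_true_eq]
          exact ⟨u, hu, hmem, hh⟩)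
    rw [hstep.1] at h ⊢
    obtain ⟨heq, hrest⟩ := ih st h
    refine ⟨heq, ?_⟩
    intro d hd
    rcases List.mem_cons.mp hd with rfl | hd
    · exact hstep.2
    · exact hrest d hd

lemma pvSaturate_superset (e : List (List Int)) (reach : PySem.Set (Int × Int)) :
    ∀ x ∈ reach, x ∈ pvSaturate e reach := by
  fun_induction pvSaturate e reach with
  | case1 reach res h ih =>
    exact fun x hx => ih x (pvFold_mono e (pvUniv e) (reach, false) x hx)
  | case2 reach res h => exact fun x hx => hx

lemma pvSaturate_sound (e : List (List Int)) (R : (Int × Int) → Prop)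
    (hR : ∀ u v, R u → pvEdge e u v → R v) (reach : PySem.Set (Int × Int)) :
    (∀ x ∈ reach, R x) → ∀ x ∈ pvSaturate e reach, R x := by
  fun_induction pvSaturate e reach with
  | case1 reach res h ih =>
    intro hst
    exact ih (pvFold_sound e R hR (pvUniv e) (fun c hc => (pvUniv_mem e c).mp hc)
      (reach, false) hst)
  | case2 reach res h => exact fun hst => hst

lemma pvSaturate_closed (e : List (List Int)) (reach : PySem.Set (Int × Int)) :
    ∀ u v, u ∈ pvSaturate e reach → pvEdge e u v → v ∈ pvSaturate e reach := by
  fun_induction pvSaturate e reach with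
  | case1 reach res h ih => exact ih
  | case2 reach res h =>
    intro u v hu he
    by_cases hv : v ∈ reach
    · exact hv
    · exfalso
      have hfalse : (pvPass e reach).2 = false := by
        simpa using h
      obtain ⟨-, hall⟩ := pvFold_stable e (pvUniv e) (reach, false) hfalse
      have hvu : v ∈ pvUniv e := (pvUniv_mem e v).mpr he.2.1
      rcases hall v hvu with hv' | hnone
      · exact hv hv'
      · exact hnone u ((pvNbrs_symm u v).mpr he.1) ⟨hu, he.2.2⟩

lemma pvFold_nodup (e : List (List Int)) (cells : List (Int × Int))
    (st : PySem.Set (Int × Int) × Bool) (h : st.1.Nodup) :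
    (cells.foldl (pvScanCell e) st).1.Nodup := by
  induction cells generalizing st with
  | nil => exact h
  | cons c cs ih =>
    refine ih (pvScanCell e st c) ?_
    unfold pvScanCell
    split_ifs
    · exact h
    · exact PySem.Set.nodup_add st.1 c h
    · exact h

lemma pvSaturate_nodup (e : List (List Int)) (reach : PySem.Set (Int × Int)) :
    reach.Nodup → (pvSaturate e reach).Nodup := by
  fun_induction pvSaturate e reach with
  | case1 reach res hr ih => exact fun h => ih (pvFold_nodup e (pvUniv e) (reach, false) h)
  | case2 reach res hr => exact fun h => h

lemma pvSaturate_iff (e : List (List Int)) (seeds : PySem.Set (Int × Int))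
    (seedList : List (Int × Int)) (hs : ∀ y, y ∈ seeds ↔ y ∈ seedList)
    (x : Int × Int) : x ∈ pvSaturate e seeds ↔ pvReach e seedList x := by
  constructor
  · exact fun h => pvSaturate_sound e (pvReach e seedList)
      (fun u v hu he => pvReach.step u v hu he) seeds
      (fun y hy => pvReach.seed y ((hs y).mp hy)) x h
  · intro h
    induction h with
    | seed c hc => exact pvSaturate_superset e seeds c ((hs c).mpr hc)
    | step u v _ he ih => exact pvSaturate_closed e seeds u v ih he

-- ---- assembly ----

lemma pvInterLen_congr (s1 t1 s2 t2 : List (Int × Int)) (h1 : s1.Nodup)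
    (h2 : s2.Nodup) (hs : ∀ x, x ∈ s1 ↔ x ∈ s2) (ht : ∀ x, x ∈ t1 ↔ x ∈ t2) :
    PySem.Set.len (PySem.Set.inter s1 t1) = PySem.Set.len (PySem.Set.inter s2 t2) := by
  have hperm : (List.filter (fun x => PySem.Set.contains t1 x) s1).Perm
      (List.filter (fun x => PySem.Set.contains t2 x) s2) := by
    rw [List.perm_ext_iff_of_nodup (List.Nodup.filter _ h1) (List.Nodup.filter _ h2)]
    intro a
    simp only [List.mem_filter, PySem.Set.contains_iff]
    rw [hs a, ht a]
  unfold PySem.Set.len PySem.Set.inter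
  exact_mod_cast hperm.length_eq

-- ===== VERDICT (by name: the statement is the Claim_ definition above) =====
theorem reachTibetAndNepal_spec : Claim_equal_reachTibetAndNepal := by
  unfold Claim_equal_reachTibetAndNepal
  intro everest _ _
  unfold Spec_reachTibetAndNepal reachTibetAndNepal reachTibetAndNepal_alt
  apply pvInterLen_congr
  · exact pvBfs_nodup everest PySem.Set.empty _ List.nodup_nil
  · exact pvSaturate_nodup everest _
      (PySem.Set.nodup_union _ _ (PySem.Set.nodup_ofList _))
  · intro x
    rw [pvBfs_iff, pvSaturate_iff everest _
      ((PySem.List.pyRange 0 (pvN everest)).map (fun r => (r, (0 : Int)))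
        ++ (PySem.List.pyRange 0 (pvM everest)).map (fun c => ((0 : Int), c)))
      (fun y => by rw [PySem.Set.mem_union, PySem.Set.mem_ofList, List.mem_append])]
  · intro x
    rw [pvBfs_iff, pvSaturate_iff everest _
      ((PySem.List.pyRange 0 (pvN everest)).map (fun r => (r, pvM everest - 1))
        ++ (PySem.List.pyRange 0 (pvM everest)).map (fun c => (pvN everest - 1, c)))
      (fun y => by rw [PySem.Set.mem_union, PySem.Set.mem_ofList, List.mem_append])]
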